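-- pv_equiv track=rewrite | github.com/GoldenDonkey/PCR-Primer-Generator | final pcr primer generator.py | complement5
-- ===== SOURCE A (Python) =====
-- def reverse_complement(x):
--     x = x[::-1]
--     x = x.replace('C', "g").replace('G',"C").replace('T', "a").replace('A',"T").replace('a',"A").replace('g',"G")
--     return x
--
-- def complement5(string1, string2):
--     string2 = reverse_complement(string2)
--     count = 0
--     for x in range(len(string1)):
--         for y in range(len(string2)):
--             i = 0
--             while ((x + i) < len(string1)) and ((y + i) < len(string2)) and (string1[x + i] == string2[y + i]):
--                 i += 1
--
--             count = max(i, count)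
--     if count >= 5:
--         return True
--     else:
--         return False
-- ===== SOURCE B (Python) =====
-- def complement5(string1, string2):
--     comp = {'A': 'T', 'T': 'A', 'a': 'A', 'C': 'G', 'G': 'C', 'g': 'G'}
--     t = ''.join(comp.get(c, c) for c in reversed(string2))
--     if len(string1) < 5 or len(t) < 5:
--         return False
--     grams = {t[i:i + 5] for i in range(len(t) - 4)}
--     return any(string1[i:i + 5] in grams for i in range(len(string1) - 4))
-- ===== Notes on version B (the rewrite author's own statement) =====
-- stated objective: faster
-- what changed: Replaces A's all-pairs common-extension scan (for every pair of start positions, extend while characters match) by hashing all length-5 substrings of the reverse complement into a set and scanning string1's length-5 windows once, and replaces the six chained str.replace passes by one per-character dict-lookup pass over the reversed string.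
import Mathlib
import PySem

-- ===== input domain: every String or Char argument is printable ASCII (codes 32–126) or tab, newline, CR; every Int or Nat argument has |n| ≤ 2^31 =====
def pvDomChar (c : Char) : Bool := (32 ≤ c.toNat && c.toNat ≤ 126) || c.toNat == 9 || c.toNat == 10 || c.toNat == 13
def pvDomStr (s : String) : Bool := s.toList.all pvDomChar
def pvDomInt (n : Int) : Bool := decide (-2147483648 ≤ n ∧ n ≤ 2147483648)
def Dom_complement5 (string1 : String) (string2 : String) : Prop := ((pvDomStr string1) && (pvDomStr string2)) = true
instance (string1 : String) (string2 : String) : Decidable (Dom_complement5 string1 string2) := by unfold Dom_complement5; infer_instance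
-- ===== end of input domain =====

-- B replaces A's O(n·m·min(n,m)) all-pairs common-extension scan by hashing the
-- length-5 substrings of the reverse complement into a set and scanning string1 once (objective: faster).

-- ===== PORT A =====
-- helper: the inner 'while' loop of A (i increments while characters match)
def pvGoI (s t : List Char) (x y i : Nat) : Nat :=
  if h : x + i < s.length ∧ y + i < t.length then
    if s[x + i]'h.1 = t[y + i]'h.2 then pvGoI s t x y (i + 1) else i
  else i
termination_by s.length - (x + i)
decreasing_by omega

-- helper: A's reverse_complement (reverse, then six chained str.replace calls)
def pvRevCompA (x : String) : String :=
  let x1 := (PySem.Str.slice? x none none (-1)).getD ""   -- x[::-1]; step -1 ≠ 0, never none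
  PySem.Str.replace (PySem.Str.replace (PySem.Str.replace (PySem.Str.replace
    (PySem.Str.replace (PySem.Str.replace x1 "C" "g") "G" "C") "T" "a") "A" "T") "a" "A") "g" "G"

def complement5 (string1 : String) (string2 : String) : Bool :=
  let s := string1.toList
  let t := (pvRevCompA string2).toList
  let count := (List.range s.length).foldl (fun count x =>
      (List.range t.length).foldl (fun count y => max (pvGoI s t x y 0) count) count) 0
  if 5 ≤ count then true else false

-- ===== PORT B =====
-- helper: B's per-character complement table (Python dict comp)
def pvComp : PySem.Dict Char Char :=
  ⟨[('A', 'T'), ('T', 'A'), ('a', 'A'), ('C', 'G'), ('G', 'C'), ('g', 'G')]⟩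

-- helper: B's reverse complement: map comp.get(c, c) over reversed(string2)
def pvRevCompB (x : String) : List Char :=
  x.toList.reverse.map (fun c => PySem.Dict.getD pvComp c c)

def complement5_alt (string1 : String) (string2 : String) : Bool :=
  let s := string1.toList
  let t := pvRevCompB string2
  if s.length < 5 ∨ t.length < 5 then false
  else
    let grams : PySem.Set (List Char) :=
      PySem.Set.ofList ((List.range (t.length - 4)).map (fun i => ((t.drop i).take 5)))
    (List.range (s.length - 4)).any (fun i => PySem.Set.contains grams ((s.drop i).take 5))

-- ===== PRECONDITION & SPEC =====
def Spec_complement5 (string1 : String) (string2 : String) (out : Bool) : Prop := out = complement5_alt string1 string2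
instance (string1 : String) (string2 : String) (out : Bool) : Decidable (Spec_complement5 string1 string2 out) := by unfold Spec_complement5; infer_instance

-- ===== CLAIM (what is proved, stated in full; the proofs are below) =====
def Claim_equal_complement5 : Prop := ∀ (string1 : String) (string2 : String), Dom_complement5 string1 string2 → Spec_complement5 string1 string2 (complement5 string1 string2)

-- ===== LEMMAS AND PROOFS =====

-- common-prefix length of two char lists
def pvCpl : List Char → List Char → Nat
  | a :: as, b :: bs => if a = b then pvCpl as bs + 1 else 0
  | _, _ => 0

theorem pvGoI_eq (s t : List Char) (x y i : Nat) :
    pvGoI s t x y i = i + pvCpl (s.drop (x + i)) (t.drop (y + i)) := by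
  fun_induction pvGoI s t x y i with
  | case1 j h heq ih =>
      have e1 : x + (j + 1) = x + j + 1 := by omega
      have e2 : y + (j + 1) = y + j + 1 := by omega
      rw [ih, e1, e2]
      rw [List.drop_eq_getElem_cons h.1, List.drop_eq_getElem_cons h.2]
      simp [pvCpl, heq]
      omega
  | case2 j h heq =>
      rw [List.drop_eq_getElem_cons h.1, List.drop_eq_getElem_cons h.2]
      simp [pvCpl, heq]
  | case3 j h =>
      rcases Nat.lt_or_ge (x + j) s.length with hx | hx
      · have hy : t.length ≤ y + j := by omega
        rw [List.drop_eq_nil_of_le hy]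
        cases s.drop (x + j) <;> simp [pvCpl]
      · rw [List.drop_eq_nil_of_le hx]
        simp [pvCpl]

theorem pvCpl_ge_iff (n : Nat) : ∀ u v : List Char,
    n ≤ pvCpl u v ↔ n ≤ u.length ∧ n ≤ v.length ∧ u.take n = v.take n := by
  induction n with
  | zero => intro u v; simp
  | succ n ih =>
    intro u v
    cases u with
    | nil => simp [pvCpl]
    | cons a as =>
      cases v with
      | nil => simp [pvCpl]
      | cons b bs =>
        by_cases hab : a = b
        · subst hab
          simp only [pvCpl, List.length_cons, List.take_succ_cons, if_true, List.cons.injEq,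
            true_and, Nat.succ_le_succ_iff]
          rw [ih]
        · simp [pvCpl, hab]

-- a foldl whose step behaves like 'max' w.r.t. a monotone predicate Q
theorem pvFoldl_iff {α : Type} (step : Nat → α → Nat) (Q : Nat → Prop) (P : α → Prop)
    (hQ : ∀ c a, Q (step c a) ↔ Q c ∨ P a) :
    ∀ (l : List α) (c0 : Nat), Q (l.foldl step c0) ↔ Q c0 ∨ ∃ a ∈ l, P a := by
  intro l
  induction l with
  | nil => simp
  | cons a l ih =>
    intro c0
    simp only [List.foldl_cons, ih, hQ]
    constructor
    · rintro ((h | h) | ⟨b, hb, h⟩)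
      · exact Or.inl h
      · exact Or.inr ⟨a, by simp, h⟩
      · exact Or.inr ⟨b, by simp [hb], h⟩
    · rintro (h | ⟨b, hb, h⟩)
      · exact Or.inl (Or.inl h)
      · rcases List.mem_cons.mp hb with rfl | hb
        · exact Or.inl (Or.inr h)
        · exact Or.inr ⟨b, hb, h⟩

-- A's count ≥ 5 iff some 5-gram of s matches some 5-gram of t
theorem pvA_iff (s t : List Char) :
    (5 ≤ (List.range s.length).foldl (fun count x =>
        (List.range t.length).foldl (fun count y => max (pvGoI s t x y 0) count) count) 0)
    ↔ ∃ x, ∃ y, 5 ≤ s.length - x ∧ 5 ≤ t.length - y ∧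
        (s.drop x).take 5 = (t.drop y).take 5 := by
  have inner : ∀ (x : Nat) (c : Nat),
      (5 ≤ (List.range t.length).foldl (fun count y => max (pvGoI s t x y 0) count) c)
      ↔ 5 ≤ c ∨ ∃ y ∈ List.range t.length, 5 ≤ pvCpl (s.drop x) (t.drop y) := by
    intro x c
    refine pvFoldl_iff _ (fun n => 5 ≤ n) (fun y => 5 ≤ pvCpl (s.drop x) (t.drop y)) ?_ _ c
    intro c y
    rw [pvGoI_eq]
    simp only [Nat.add_zero, Nat.zero_add]
    omega
  have outer := pvFoldl_iff
      (fun count x => (List.range t.length).foldl (fun count y => max (pvGoI s t x y 0) count) count)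
      (fun n => 5 ≤ n)
      (fun x => ∃ y ∈ List.range t.length, 5 ≤ pvCpl (s.drop x) (t.drop y))
      (by intro c x; exact inner x c) (List.range s.length) 0
  rw [outer]
  constructor
  · rintro (h | ⟨x, _, y, hy, h⟩)
    · omega
    · refine ⟨x, y, ?_⟩
      rw [pvCpl_ge_iff] at h
      simp only [List.length_drop] at h
      exact ⟨h.1, h.2.1, h.2.2⟩
  · rintro ⟨x, y, hx, hy, h⟩
    right
    refine ⟨x, ?_, y, ?_, ?_⟩
    · simp; omega
    · simp; omega
    · rw [pvCpl_ge_iff]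
      simp only [List.length_drop]
      exact ⟨hx, hy, h⟩

-- six chained single-char replaces act characterwise
theorem pvReplace_go_single (c d : Char) :
    ∀ (fuel : Nat) (l acc : List Char), l.length ≤ fuel →
      PySem.Chars.replace.go [c] [d] fuel l acc
        = acc.reverse ++ l.map (fun a => if a = c then d else a) := by
  intro fuel
  induction fuel with
  | zero =>
    intro l acc h
    have : l = [] := List.eq_nil_of_length_eq_zero (by omega)
    subst this
    simp [PySem.Chars.replace.go]
  | succ fuel ih =>
    intro l acc h
    cases l with
    | nil => simp [PySem.Chars.replace.go]
    | cons a t =>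
      simp only [PySem.Chars.replace.go]
      by_cases hac : a = c
      · subst hac
        have hp : [a].isPrefixOf (a :: t) = true := by
          simp [List.isPrefixOf]
        rw [if_pos hp]
        have e1 : List.drop [a].length (a :: t) = t := rfl
        have e2 : [d].reverse ++ acc = d :: acc := rfl
        rw [e1, e2, ih t _ (by simpa using Nat.le_of_succ_le_succ h)]
        simp
      · have hp : [c].isPrefixOf (a :: t) = false := by
          simp [List.isPrefixOf]
          intro hh
          exact absurd hh.symm (by simpa using hac)
        rw [if_neg (by simp [hp])]
        rw [ih t _ (by simpa using Nat.le_of_succ_le_succ h)]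
        simp [hac]

theorem pvReplace_single (c d : Char) (s : List Char) :
    PySem.Chars.replace s [c] [d] = s.map (fun a => if a = c then d else a) := by
  simp only [PySem.Chars.replace, List.isEmpty]
  rw [if_neg (by simp)]
  simpa using pvReplace_go_single c d s.length s [] (le_refl _)

-- the two reverse-complement helpers agree
theorem pvRevComp_eq (x : String) : (pvRevCompA x).toList = pvRevCompB x := by
  unfold pvRevCompA pvRevCompB
  rw [PySem.Str.slice?_none_none_neg_one]
  simp only [Option.getD_some]
  rw [PySem.Str.toList_replace]
  rw [PySem.Str.toList_replace]
  rw [PySem.Str.toList_replace]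
  rw [PySem.Str.toList_replace]
  rw [PySem.Str.toList_replace]
  rw [PySem.Str.toList_replace]
  have hofl : (String.ofList x.toList.reverse).toList = x.toList.reverse := by
    simp
  rw [hofl]
  show PySem.Chars.replace (PySem.Chars.replace (PySem.Chars.replace (PySem.Chars.replace
    (PySem.Chars.replace (PySem.Chars.replace x.toList.reverse ['C'] ['g']) ['G'] ['C'])
    ['T'] ['a']) ['A'] ['T']) ['a'] ['A']) ['g'] ['G'] = _
  rw [pvReplace_single, pvReplace_single, pvReplace_single, pvReplace_single,
      pvReplace_single, pvReplace_single]
  simp only [List.map_map]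
  apply List.map_congr_left
  intro a _
  simp only [Function.comp]
  by_cases h1 : a = 'C'
  · subst h1; decide
  by_cases h2 : a = 'G'
  · subst h2; decide
  by_cases h3 : a = 'T'
  · subst h3; decide
  by_cases h4 : a = 'A'
  · subst h4; decide
  by_cases h5 : a = 'a'
  · subst h5; decide
  by_cases h6 : a = 'g'
  · subst h6; decide
  have e1 : ('A' == a) = false := by simp; exact fun h => h4 h.symm
  have e2 : ('T' == a) = false := by simp; exact fun h => h3 h.symm
  have e3 : ('a' == a) = false := by simp; exact fun h => h5 h.symm
  have e4 : ('C' == a) = false := by simp; exact fun h => h1 h.symm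
  have e5 : ('G' == a) = false := by simp; exact fun h => h2 h.symm
  have e6 : ('g' == a) = false := by simp; exact fun h => h6 h.symm
  simp [pvComp, PySem.Dict.getD, PySem.Dict.get?, List.find?, e1, e2, e3, e4, e5, e6,
    h1, h2, h3, h4, h5, h6]

-- B = true iff some 5-gram of s matches some 5-gram of t
theorem pvB_iff (s t : List Char) :
    ((if s.length < 5 ∨ t.length < 5 then false
      else (List.range (s.length - 4)).any (fun i =>
        PySem.Set.contains (PySem.Set.ofList ((List.range (t.length - 4)).map
          (fun i => ((t.drop i).take 5)))) ((s.drop i).take 5))) = true)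
    ↔ ∃ x, ∃ y, 5 ≤ s.length - x ∧ 5 ≤ t.length - y ∧
        (s.drop x).take 5 = (t.drop y).take 5 := by
  by_cases hlen : s.length < 5 ∨ t.length < 5
  · rw [if_pos hlen]
    simp only [Bool.false_eq_true, false_iff]
    rintro ⟨x, y, hx, hy, -⟩
    omega
  · rw [if_neg hlen]
    simp only [not_or, Nat.not_lt] at hlen
    rw [List.any_eq_true]
    constructor
    · rintro ⟨i, hi, h⟩
      simp only [List.mem_range] at hi
      have : (s.drop i).take 5 ∈ PySem.Set.ofList ((List.range (t.length - 4)).map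
          (fun j => ((t.drop j).take 5))) := by
        simpa [PySem.Set.contains, List.contains_iff_mem] using h
      rw [PySem.Set.mem_ofList] at this
      rcases List.mem_map.mp this with ⟨j, hj, hje⟩
      simp only [List.mem_range] at hj
      exact ⟨i, j, by omega, by omega, hje.symm⟩
    · rintro ⟨x, y, hx, hy, h⟩
      refine ⟨x, by simp; omega, ?_⟩
      have hmem : (t.drop y).take 5 ∈ (List.range (t.length - 4)).map
          (fun j => ((t.drop j).take 5)) :=
        List.mem_map.mpr ⟨y, by simp; omega, rfl⟩
      have : (s.drop x).take 5 ∈ PySem.Set.ofList ((List.range (t.length - 4)).map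
          (fun j => ((t.drop j).take 5))) := by
        rw [PySem.Set.mem_ofList]; rw [h]; exact hmem
      simpa [PySem.Set.contains, List.contains_iff_mem] using this

-- ===== VERDICT (by name: the statement is the Claim_ definition above) =====
theorem complement5_spec : Claim_equal_complement5 := by
  intro string1 string2 _
  unfold Spec_complement5 complement5 complement5_alt
  rw [pvRevComp_eq]
  set s := string1.toList
  set t := pvRevCompB string2
  have hA := pvA_iff s t
  have hB := pvB_iff s t
  by_cases h : ∃ x, ∃ y, 5 ≤ s.length - x ∧ 5 ≤ t.length - y ∧
      (s.drop x).take 5 = (t.drop y).take 5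
  · rw [if_pos (hA.mpr h)]
    exact (hB.mpr h).symm
  · rw [if_neg (fun hc => h (hA.mp hc))]
    symm
    by_contra hc
    rw [Bool.not_eq_false] at hc
    exact h (hB.mp hc)
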